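-- pv_equiv track=rewrite | github.com/baek0203/script_extractor | src/semantic_segmentation.py | group_into_paragraphs
-- ===== SOURCE A (Python) =====
-- from typing import List, Set, Tuple
--
-- def group_into_paragraphs(sentences: List[str],
--                          boundaries: Set[int],
--                          min_paragraph_length: int = 2) -> List[List[str]]:
--     """
--     Group sentences into paragraphs based on detected boundaries.
--
--     Args:
--         sentences: List of sentences
--         boundaries: Set of indices where paragraphs should start
--         min_paragraph_length: Minimum number of sentences per paragraph
--
--     Returns:
--         List of paragraphs (each paragraph is a list of sentences)
--     """
--     paragraphs = []
--     current = []
--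
--     for i, sent in enumerate(sentences):
--         # Start new paragraph at boundary (if current has enough sentences)
--         if i in boundaries and len(current) >= min_paragraph_length:
--             paragraphs.append(current)
--             current = []
--
--         current.append(sent)
--
--     # Add remaining sentences
--     if current:
--         # Merge with previous if too short
--         if paragraphs and len(current) < min_paragraph_length:
--             paragraphs[-1].extend(current)
--         else:
--             paragraphs.append(current)
--
--     return paragraphs
-- ===== SOURCE B (Python) =====
-- def group_into_paragraphs(sentences, boundaries, min_paragraph_length=2):
--     n = len(sentences)
--     # 1) compute cut indices
--     cuts = [0]
--     last = 0
--     for b in sorted(boundaries):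
--         if 0 <= b < n and b - last >= min_paragraph_length:
--             cuts.append(b)
--             last = b
--     # 2) slice between successive cuts
--     paragraphs = [sentences[cuts[i]:cuts[i + 1]] for i in range(len(cuts) - 1)]
--     # 3) trailing slice, merged into the previous paragraph if too short
--     tail = sentences[last:]
--     if tail:
--         if paragraphs and len(tail) < min_paragraph_length:
--             paragraphs[-1] = paragraphs[-1] + tail
--         else:
--             paragraphs.append(tail)
--     return paragraphs
-- ===== Notes on version B (the rewrite author's own statement) =====
-- stated objective: alternative
-- what changed: Replaces A's per-sentence accumulate-and-append pass with a compute-cuts-then-slice pass: first fold over sorted(boundaries) keeping the last cut to collect cut indices, then build paragraphs by slicing sentences between successive cuts, then apply the same trailing-merge rule.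
import Mathlib
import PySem

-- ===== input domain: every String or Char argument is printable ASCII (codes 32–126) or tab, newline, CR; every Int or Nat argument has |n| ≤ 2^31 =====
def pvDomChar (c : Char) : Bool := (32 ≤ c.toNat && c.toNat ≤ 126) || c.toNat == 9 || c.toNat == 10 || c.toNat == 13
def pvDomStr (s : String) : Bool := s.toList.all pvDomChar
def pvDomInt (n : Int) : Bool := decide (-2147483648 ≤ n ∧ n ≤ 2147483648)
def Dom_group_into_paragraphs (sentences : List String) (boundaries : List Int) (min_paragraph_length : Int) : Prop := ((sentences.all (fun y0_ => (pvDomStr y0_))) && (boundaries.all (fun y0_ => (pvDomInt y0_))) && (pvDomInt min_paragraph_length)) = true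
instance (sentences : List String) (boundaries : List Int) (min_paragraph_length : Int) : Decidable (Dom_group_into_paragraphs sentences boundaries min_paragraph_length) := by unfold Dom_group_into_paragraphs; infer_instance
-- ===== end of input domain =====

-- B replaces A's per-sentence accumulate-and-append pass with a compute-cut-indices-then-slice
-- pass (same result; A mutates paragraphs[-1] in place in its merge step — the claim is about
-- the return value only).


-- ===== PORT A =====
-- the 'for i, sent in enumerate(sentences)' loop, state (paragraphs, current)
def gipALoop (boundaries : List Int) (minLen : Int) :
    List (Int × String) → List (List String) → List String → List (List String) × List String
  | [], paragraphs, current => (paragraphs, current)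
  | (i, sent) :: rest, paragraphs, current =>
    if i ∈ boundaries ∧ minLen ≤ (current.length : Int) then
      gipALoop boundaries minLen rest (paragraphs ++ [current]) [sent]
    else
      gipALoop boundaries minLen rest paragraphs (current ++ [sent])

def group_into_paragraphs (sentences : List String) (boundaries : List Int) (min_paragraph_length : Int) : List (List String) :=
  let st := gipALoop boundaries min_paragraph_length (PySem.List.enumerate sentences) [] []
  let paragraphs := st.1
  let current := st.2
  if current ≠ [] then
    if paragraphs ≠ [] ∧ (current.length : Int) < min_paragraph_length then
      paragraphs.dropLast ++ [paragraphs.getLast! ++ current]   -- paragraphs[-1].extend(current)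
    else
      paragraphs ++ [current]
  else paragraphs

-- ===== PORT B =====
-- the 'for b in sorted(boundaries)' loop of Source B, state (cuts, last)
def gipBLoop (n minLen : Int) : List Int → List Int → Int → List Int × Int
  | [], cuts, last => (cuts, last)
  | b :: bs, cuts, last =>
    if 0 ≤ b ∧ b < n ∧ minLen ≤ b - last then gipBLoop n minLen bs (cuts ++ [b]) b
    else gipBLoop n minLen bs cuts last

def group_into_paragraphs_alt (sentences : List String) (boundaries : List Int) (min_paragraph_length : Int) : List (List String) :=
  let n : Int := sentences.length
  let st := gipBLoop n min_paragraph_length (PySem.List.sorted boundaries (fun x => x) false) [0] 0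
  let cuts := st.1
  let last := st.2
  let paragraphs := (List.range (cuts.length - 1)).map
    (fun i => PySem.List.slice sentences (some (cuts.getD i 0)) (some (cuts.getD (i + 1) 0)))
  let tail := PySem.List.slice sentences (some last) none
  if tail ≠ [] then
    if paragraphs ≠ [] ∧ (tail.length : Int) < min_paragraph_length then
      paragraphs.dropLast ++ [paragraphs.getLast! ++ tail]
    else
      paragraphs ++ [tail]
  else paragraphs

-- ===== PRECONDITION & SPEC =====
-- In the Python source 'boundaries' is a set; Pre_ only asks that the List Int really represents
-- one (distinct elements) — a duplicate-carrying list is not the image of any Python input.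
def Pre_group_into_paragraphs (sentences : List String) (boundaries : List Int) (min_paragraph_length : Int) : Prop :=
  boundaries.Nodup
instance (sentences : List String) (boundaries : List Int) (min_paragraph_length : Int) : Decidable (Pre_group_into_paragraphs sentences boundaries min_paragraph_length) := by unfold Pre_group_into_paragraphs; infer_instance

def pvWitness_group_into_paragraphs : List String × List Int × Int := (["a", "b", "c"], [2], 2)

def Spec_group_into_paragraphs (sentences : List String) (boundaries : List Int) (min_paragraph_length : Int) (out : List (List String)) : Prop := out = group_into_paragraphs_alt sentences boundaries min_paragraph_length
instance (sentences : List String) (boundaries : List Int) (min_paragraph_length : Int) (out : List (List String)) : Decidable (Spec_group_into_paragraphs sentences boundaries min_paragraph_length out) := by unfold Spec_group_into_paragraphs; infer_instance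

-- ===== CLAIM (what is proved, stated in full; the proofs are below) =====
def Claim_equal_group_into_paragraphs : Prop := ∀ (sentences : List String) (boundaries : List Int) (min_paragraph_length : Int), Dom_group_into_paragraphs sentences boundaries min_paragraph_length → Pre_group_into_paragraphs sentences boundaries min_paragraph_length → Spec_group_into_paragraphs sentences boundaries min_paragraph_length (group_into_paragraphs sentences boundaries min_paragraph_length)

-- ===== LEMMAS AND PROOFS =====

-- proof-side vocabulary: the slice of sentences between two cut indices
def seg (s : List String) (a b : Nat) : List String := (s.drop a).take (b - a)

-- the cut list both loops compute, read off an index sweep 0..n-1 (A's traversal order)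
def sweep (bnd : List Int) (minLen : Int) : List Nat → Nat → List Nat × Nat
  | [], last => ([], last)
  | i :: is, last =>
    if (i : Int) ∈ bnd ∧ minLen ≤ (i : Int) - (last : Int) then
      let r := sweep bnd minLen is i
      (i :: r.1, r.2)
    else sweep bnd minLen is last

-- B's loop, without the accumulator
def cutsRec (n minLen : Int) : List Int → Int → List Int × Int
  | [], last => ([], last)
  | b :: bs, last =>
    if 0 ≤ b ∧ b < n ∧ minLen ≤ b - last then
      let r := cutsRec n minLen bs b
      (b :: r.1, r.2)
    else cutsRec n minLen bs last

-- paragraphs as slices between successive cuts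
def pieces (s : List String) : Nat → List Nat → List (List String)
  | _, [] => []
  | prev, c :: cs => seg s prev c :: pieces s c cs

theorem seg_length (s : List String) {a b : Nat} (hb : b ≤ s.length) :
    (seg s a b).length = b - a := by
  simp [seg]; omega

theorem seg_snoc (s : List String) {a b : Nat} (hab : a ≤ b) (hb : b < s.length) :
    seg s a b ++ [s[b]] = seg s a (b + 1) := by
  unfold seg
  have h1 : b + 1 - a = (b - a) + 1 := by omega
  rw [h1, List.take_add_one]
  have h2 : (s.drop a)[b - a]? = some s[b] := by
    rw [List.getElem?_drop]
    have : a + (b - a) = b := by omega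
    rw [this, List.getElem?_eq_getElem hb]
  simp [h2]

theorem seg_full (s : List String) (a : Nat) : seg s a s.length = s.drop a := by
  unfold seg
  apply List.take_of_length_le
  simp

theorem gipALoop_eq (bnd : List Int) (minLen : Int) (s : List String) :
    ∀ (k lo last : Nat) (P : List (List String)),
      lo + k = s.length → last ≤ lo →
      gipALoop bnd minLen (PySem.List.enumerate (s.drop lo) (lo : Int)) P (seg s last lo)
        = (P ++ pieces s last (sweep bnd minLen (List.range' lo k) last).1,
           seg s (sweep bnd minLen (List.range' lo k) last).2 s.length) := by
  intro k
  induction k with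
  | zero =>
    intro lo last P hk _
    have hlo : lo = s.length := by omega
    subst hlo
    simp [gipALoop, sweep, pieces, PySem.List.enumerate]
  | succ k ih =>
    intro lo last P hk hle
    have hlt : lo < s.length := by omega
    have hdrop : s.drop lo = s[lo] :: s.drop (lo + 1) := (List.getElem_cons_drop hlt).symm
    rw [hdrop, PySem.List.enumerate_cons, List.range'_succ]
    have hlen : ((seg s last lo).length : Int) = (lo : Int) - (last : Int) := by
      rw [seg_length s (by omega)]; omega
    by_cases hc : (lo : Int) ∈ bnd ∧ minLen ≤ (lo : Int) - (last : Int)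
    · have hcA : (lo : Int) ∈ bnd ∧ minLen ≤ ((seg s last lo).length : Int) := by
        rw [hlen]; exact hc
      rw [gipALoop, if_pos hcA]
      have hseg1 : [s[lo]] = seg s lo (lo + 1) := by
        unfold seg
        rw [Nat.add_sub_cancel_left, hdrop]
        rfl
      rw [hseg1]
      have : ((lo : Int) + 1) = ((lo + 1 : Nat) : Int) := by push_cast; ring
      rw [this, ih (lo + 1) lo (P ++ [seg s last lo]) (by omega) (by omega)]
      rw [sweep, if_pos hc]
      simp [pieces]
    · have hcA : ¬ ((lo : Int) ∈ bnd ∧ minLen ≤ ((seg s last lo).length : Int)) := by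
        rw [hlen]; exact hc
      rw [gipALoop, if_neg hcA]
      rw [seg_snoc s hle hlt]
      have : ((lo : Int) + 1) = ((lo + 1 : Nat) : Int) := by push_cast; ring
      rw [this, ih (lo + 1) last P (by omega) (by omega)]
      rw [sweep, if_neg hc]

theorem gipBLoop_eq (n minLen : Int) :
    ∀ (bs acc : List Int) (last : Int),
      gipBLoop n minLen bs acc last
        = (acc ++ (cutsRec n minLen bs last).1, (cutsRec n minLen bs last).2) := by
  intro bs
  induction bs with
  | nil => intro acc last; simp [gipBLoop, cutsRec]
  | cons b bs ih =>
    intro acc last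
    rw [gipBLoop, cutsRec]
    by_cases hc : 0 ≤ b ∧ b < n ∧ minLen ≤ b - last
    · rw [if_pos hc, if_pos hc, ih]; simp
    · rw [if_neg hc, if_neg hc, ih]

theorem cutsRec_past (n minLen : Int) :
    ∀ (l : List Int) (last : Int), (∀ b ∈ l, n ≤ b) → cutsRec n minLen l last = ([], last) := by
  intro l
  induction l with
  | nil => intro last _; rfl
  | cons b bs ih =>
    intro last h
    have hb : n ≤ b := h b (by simp)
    rw [cutsRec, if_neg (by intro hc; omega)]
    exact ih last (fun x hx => h x (by simp [hx]))

theorem cutsRec_filter_nonneg (n minLen : Int) :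
    ∀ (l : List Int) (last : Int),
      cutsRec n minLen l last = cutsRec n minLen (l.filter (fun b => decide ((0:Int) ≤ b))) last := by
  intro l
  induction l with
  | nil => intro last; rfl
  | cons b bs ih =>
    intro last
    by_cases hb : (0:Int) ≤ b
    · rw [List.filter_cons_of_pos (by simpa using hb), cutsRec, cutsRec]
      by_cases hc : 0 ≤ b ∧ b < n ∧ minLen ≤ b - last
      · rw [if_pos hc, if_pos hc, ih]
      · rw [if_neg hc, if_neg hc, ih]
    · rw [List.filter_cons_of_neg (by simpa using hb), cutsRec,
        if_neg (by intro hc; exact hb hc.1), ih]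

theorem filter_step_mem {bs : List Int} (hs : bs.Pairwise (· < ·)) {x : Int} (hx : x ∈ bs) :
    bs.filter (fun b => decide (x ≤ b)) = x :: bs.filter (fun b => decide (x + 1 ≤ b)) := by
  induction bs with
  | nil => cases hx
  | cons b bs ih =>
    rcases List.mem_cons.mp hx with hbx | hxs
    · subst hbx
      rw [List.filter_cons_of_pos (by simp)]
      congr 1
      rw [List.filter_cons_of_neg (by simp)]
      apply List.filter_congr
      intro y hy
      have : x < y := (List.pairwise_cons.mp hs).1 y hy
      simp; omega
    · have hb : b < x := (List.pairwise_cons.mp hs).1 x hxs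
      rw [List.filter_cons_of_neg (by simp; omega), List.filter_cons_of_neg (by simp; omega)]
      exact ih (List.pairwise_cons.mp hs).2 hxs

theorem filter_step_notmem {bs : List Int} {x : Int} (hx : x ∉ bs) :
    bs.filter (fun b => decide (x ≤ b)) = bs.filter (fun b => decide (x + 1 ≤ b)) := by
  apply List.filter_congr
  intro y hy
  have : y ≠ x := by rintro rfl; exact hx hy
  simp; omega

theorem bridge (bnd bs : List Int) (minLen : Int) (n : Nat)
    (hs : bs.Pairwise (· < ·)) (hmem : ∀ x : Int, x ∈ bs ↔ x ∈ bnd) :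
    ∀ (k lo last : Nat), lo + k = n →
      cutsRec (n : Int) minLen (bs.filter (fun b => decide ((lo : Int) ≤ b))) (last : Int)
        = (((sweep bnd minLen (List.range' lo k) last).1).map (fun i : Nat => (i : Int)),
           ((sweep bnd minLen (List.range' lo k) last).2 : Int)) := by
  intro k
  induction k with
  | zero =>
    intro lo last hk
    have hlo : lo = n := by omega
    subst hlo
    rw [cutsRec_past]
    · simp [sweep]
    · intro b hb
      have := List.of_mem_filter hb
      simpa using this
  | succ k ih =>
    intro lo last hk
    rw [List.range'_succ]
    by_cases hb : (lo : Int) ∈ bs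
    · rw [filter_step_mem hs hb]
      have hcast : ((lo : Int) + 1) = ((lo + 1 : Nat) : Int) := by push_cast; ring
      by_cases hc : (lo : Int) ∈ bnd ∧ minLen ≤ (lo : Int) - (last : Int)
      · rw [cutsRec, if_pos (by refine ⟨by positivity, ?_, hc.2⟩; exact_mod_cast by omega)]
        rw [sweep, if_pos hc]
        rw [hcast, ih (lo + 1) lo (by omega)]
        simp
      · have hcB : ¬ (0 ≤ (lo : Int) ∧ (lo : Int) < (n : Int) ∧ minLen ≤ (lo : Int) - (last : Int)) := by
          intro h
          exact hc ⟨(hmem _).mp hb, h.2.2⟩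
        rw [cutsRec, if_neg hcB, sweep, if_neg hc, hcast, ih (lo + 1) last (by omega)]
    · rw [filter_step_notmem hb]
      have hcn : ¬ ((lo : Int) ∈ bnd ∧ minLen ≤ (lo : Int) - (last : Int)) := by
        intro h
        exact hb ((hmem _).mpr h.1)
      rw [sweep, if_neg hcn]
      have hcast : ((lo : Int) + 1) = ((lo + 1 : Nat) : Int) := by push_cast; ring
      rw [hcast, ih (lo + 1) last (by omega)]

theorem slices_eq_pieces (s : List String) :
    ∀ (cs : List Nat) (prev : Nat),
      (List.range (((prev :: cs).map (fun j : Nat => (j : Int))).length - 1)).map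
        (fun i => PySem.List.slice s
          (some (((prev :: cs).map (fun j : Nat => (j : Int))).getD i 0))
          (some (((prev :: cs).map (fun j : Nat => (j : Int))).getD (i + 1) 0)))
      = pieces s prev cs := by
  intro cs
  induction cs with
  | nil => intro prev; simp [pieces]
  | cons c cs ih =>
    intro prev
    have hlen : ((prev :: c :: cs).map (fun j : Nat => (j : Int))).length - 1
        = (((c :: cs).map (fun j : Nat => (j : Int))).length - 1) + 1 := by
      simp
    have hp : pieces s prev (c :: cs) = seg s prev c :: pieces s c cs := rfl
    rw [hlen, List.range_succ_eq_map, List.map_cons, hp]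
    congr 1
    · simp [PySem.List.slice_natCast, seg]
    · rw [List.map_map, ← ih c]
      apply List.map_congr_left
      intro i _
      simp [Function.comp, List.getD_cons_succ]

-- glue: A's loop result and B's loop result, both as sweep
theorem body_eq (sentences : List String) (boundaries : List Int) (minLen : Int) :
    (gipALoop boundaries minLen (PySem.List.enumerate sentences) [] []).1
        = pieces sentences 0 (sweep boundaries minLen (List.range' 0 sentences.length) 0).1
      ∧ (gipALoop boundaries minLen (PySem.List.enumerate sentences) [] []).2
        = seg sentences (sweep boundaries minLen (List.range' 0 sentences.length) 0).2 sentences.length := by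
  have h0 : PySem.List.enumerate sentences = PySem.List.enumerate (sentences.drop 0) ((0 : Nat) : Int) := by
    simp
  have := gipALoop_eq boundaries minLen sentences sentences.length 0 0 [] (by omega) (le_refl 0)
  rw [← h0] at this
  have hseg0 : seg sentences 0 0 = [] := by simp [seg]
  rw [hseg0] at this
  rw [this]
  simp

theorem group_into_paragraphs_eq (sentences : List String) (boundaries : List Int)
    (minLen : Int) (hnd : boundaries.Nodup) :
    group_into_paragraphs sentences boundaries minLen
      = group_into_paragraphs_alt sentences boundaries minLen := by
  -- the sorted boundary list is strictly increasing
  have hperm : (PySem.List.sorted boundaries (fun x => x) false).Perm boundaries :=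
    PySem.List.sorted_perm boundaries (fun x => x) false
  have hnd' : (PySem.List.sorted boundaries (fun x => x) false).Nodup := hperm.symm.nodup hnd
  have hle : (PySem.List.sorted boundaries (fun x => x) false).Pairwise (fun a b => a ≤ b) :=
    PySem.List.sorted_pairwise boundaries (fun x => x)
  have hs : (PySem.List.sorted boundaries (fun x => x) false).Pairwise (· < ·) :=
    (List.Pairwise.and hle hnd').imp (fun h => lt_of_le_of_ne h.1 h.2)
  have hmem : ∀ x : Int, x ∈ PySem.List.sorted boundaries (fun x => x) false ↔ x ∈ boundaries :=
    fun x => hperm.mem_iff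
  -- B's loop computes the cast of the sweep
  have hcuts : cutsRec (sentences.length : Int) minLen (PySem.List.sorted boundaries (fun x => x) false) 0
      = (((sweep boundaries minLen (List.range' 0 sentences.length) 0).1).map (fun i : Nat => (i : Int)),
         (((sweep boundaries minLen (List.range' 0 sentences.length) 0).2 : Nat) : Int)) := by
    rw [cutsRec_filter_nonneg]
    have h0 : ((0 : Nat) : Int) = (0 : Int) := by norm_num
    have := bridge boundaries (PySem.List.sorted boundaries (fun x => x) false) minLen
      sentences.length hs hmem sentences.length 0 0 (by omega)
    rw [h0] at this
    exact this
  obtain ⟨hA1, hA2⟩ := body_eq sentences boundaries minLen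
  have hB := gipBLoop_eq (sentences.length : Int) minLen
    (PySem.List.sorted boundaries (fun x => x) false) [0] 0
  simp only [group_into_paragraphs, group_into_paragraphs_alt]
  rw [hB, hcuts, hA1, hA2]
  have hcl : (([0] : List Int) ++ ((sweep boundaries minLen (List.range' 0 sentences.length) 0).1).map (fun i : Nat => (i : Int)))
      = ((0 :: (sweep boundaries minLen (List.range' 0 sentences.length) 0).1).map (fun j : Nat => (j : Int))) := by
    simp
  rw [hcl, slices_eq_pieces sentences (sweep boundaries minLen (List.range' 0 sentences.length) 0).1 0]
  have htail : PySem.List.slice sentences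
      (some (((sweep boundaries minLen (List.range' 0 sentences.length) 0).2 : Nat) : Int)) none
      = seg sentences (sweep boundaries minLen (List.range' 0 sentences.length) 0).2 sentences.length := by
    rw [PySem.List.slice_from_natCast, seg_full]
  rw [htail]

-- ===== VERDICT (by name: the statement is the Claim_ definition above) =====
theorem group_into_paragraphs_spec : Claim_equal_group_into_paragraphs := by
  intro sentences boundaries minLen _ hpre
  unfold Spec_group_into_paragraphs
  exact group_into_paragraphs_eq sentences boundaries minLen hpre
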